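-- pv_equiv track=rewrite | github.com/CCBR/CARLISLE | resources/HOCOMOCO/split_meme_to_tar.py | split_header_and_motifs
-- ===== SOURCE A (Python) =====
-- from typing import List, Tuple
--
-- def split_header_and_motifs(lines: List[str]) -> Tuple[List[str], List[List[str]]]:
--     """
--     Split a MEME v4 file into:
--     - header_lines: everything up to (but not including) the first 'MOTIF' line
--     - motifs: list of motif blocks (each starting with 'MOTIF ...')
--     """
--     header_lines = []
--     motifs = []
--
--     in_header = True
--     current_motif = []
--
--     for line in lines:
--         if in_header:
--             if line.startswith("MOTIF"):
--                 in_header = False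
--                 current_motif = [line]
--             else:
--                 header_lines.append(line)
--         else:
--             # in motif region
--             if line.startswith("MOTIF"):
--                 # Start a new motif, push previous if any
--                 if current_motif:
--                     motifs.append(current_motif)
--                 current_motif = [line]
--             else:
--                 current_motif.append(line)
--
--     # Append last motif if exists
--     if current_motif:
--         motifs.append(current_motif)
--
--     if not motifs:
--         raise ValueError("No motifs found (no lines starting with 'MOTIF').")
--
--     return header_lines, motifs
-- ===== SOURCE B (Python) =====
-- from typing import List, Tuple
--
-- def split_header_and_motifs(lines: List[str]) -> Tuple[List[str], List[List[str]]]: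
--     """Index-and-slice version: find all MOTIF line positions once, then slice."""
--     starts = [i for i, line in enumerate(lines) if line.startswith("MOTIF")]
--     if not starts:
--         raise ValueError("No motifs found (no lines starting with 'MOTIF').")
--     bounds = starts + [len(lines)]
--     motifs = [lines[a:b] for a, b in zip(bounds, bounds[1:])]
--     return lines[:starts[0]], motifs
-- ===== Notes on version B (the rewrite author's own statement) =====
-- stated objective: simpler
-- what changed: Replaces A's per-line boolean/accumulator state machine by one pass that collects the indices of MOTIF lines and then builds the header and the motif blocks by slicing between consecutive indices.
import Mathlib
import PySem

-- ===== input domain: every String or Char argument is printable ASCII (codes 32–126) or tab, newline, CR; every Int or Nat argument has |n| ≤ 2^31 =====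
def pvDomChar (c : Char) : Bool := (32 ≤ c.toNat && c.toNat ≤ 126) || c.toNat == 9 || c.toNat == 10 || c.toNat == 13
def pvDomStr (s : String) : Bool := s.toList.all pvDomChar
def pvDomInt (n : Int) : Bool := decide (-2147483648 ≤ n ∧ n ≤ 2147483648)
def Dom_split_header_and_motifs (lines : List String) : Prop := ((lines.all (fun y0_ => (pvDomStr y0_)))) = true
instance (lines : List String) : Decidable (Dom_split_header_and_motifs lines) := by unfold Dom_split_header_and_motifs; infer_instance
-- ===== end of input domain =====

-- B replaces A's per-line state machine by collecting MOTIF line indices once and slicing between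
-- consecutive indices (objective: simpler).

-- ===== PORT A =====
def split_header_and_motifs (lines : List String) : List String × List (List String) :=
  let st := lines.foldl
    (fun (st : List String × List (List String) × Bool × List String) line =>
      let hdr := st.1; let ms := st.2.1; let inH := st.2.2.1; let cur := st.2.2.2
      if inH then
        if PySem.Str.startswith line "MOTIF" then (hdr, ms, false, [line])
        else (hdr ++ [line], ms, inH, cur)
      else
        if PySem.Str.startswith line "MOTIF" then
          (hdr, (if cur = [] then ms else ms ++ [cur]), inH, [line])
        else (hdr, ms, inH, cur ++ [line]))
    ([], [], true, [])
  let hdr := st.1; let ms := st.2.1; let cur := st.2.2.2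
  let ms := if cur = [] then ms else ms ++ [cur]
  -- Python raises ValueError when ms = [] (excluded by Pre_); the port returns (hdr, []) there.
  (hdr, ms)

-- ===== PORT B =====
def split_header_and_motifs_alt (lines : List String) : List String × List (List String) :=
  let starts : List Int := (PySem.List.enumerate lines 0).filterMap
    (fun q => if PySem.Str.startswith q.2 "MOTIF" then some q.1 else none)
  match starts with
  | [] => ([], [])   -- Python raises ValueError here (excluded by Pre_)
  | s0 :: rest =>
    let bounds : List Int := (s0 :: rest) ++ [(lines.length : Int)]
    (PySem.List.slice lines none (some s0),
     (bounds.zip bounds.tail).map (fun q => PySem.List.slice lines (some q.1) (some q.2)))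

-- ===== PRECONDITION & SPEC =====
-- Pre_ excludes exactly the inputs with no line starting with "MOTIF", on which both A and B raise ValueError.
def Pre_split_header_and_motifs (lines : List String) : Prop :=
  lines.any (fun l => PySem.Str.startswith l "MOTIF") = true
instance (lines : List String) : Decidable (Pre_split_header_and_motifs lines) := by
  unfold Pre_split_header_and_motifs; infer_instance
def pvWitness_split_header_and_motifs : List String := ["# header", "MOTIF A", "1 2", "MOTIF B"]

def Spec_split_header_and_motifs (lines : List String) (out : List String × List (List String)) : Prop := out = split_header_and_motifs_alt lines
instance (lines : List String) (out : List String × List (List String)) : Decidable (Spec_split_header_and_motifs lines out) := by unfold Spec_split_header_and_motifs; infer_instance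

-- ===== CLAIM (what is proved, stated in full; the proofs are below) =====
def Claim_equal_split_header_and_motifs : Prop := ∀ (lines : List String), Dom_split_header_and_motifs lines → Pre_split_header_and_motifs lines → Spec_split_header_and_motifs lines (split_header_and_motifs lines)

-- ===== LEMMAS AND PROOFS =====

/-- The MOTIF-line test. -/
def pM (l : String) : Bool := PySem.Str.startswith l "MOTIF"

/-- Completed blocks and the still-open block of A's motif region. -/
def blockAcc : List String → List String → List (List String) × List String
  | cur, [] => ([], cur)
  | cur, x :: xs =>
    if pM x then ((blockAcc [x] xs).1.cons cur, (blockAcc [x] xs).2)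
    else blockAcc (cur ++ [x]) xs

def blocks (cur t : List String) : List (List String) :=
  (blockAcc cur t).1 ++ [(blockAcc cur t).2]

/-- Indices (from `s`) of MOTIF lines. -/
def startsFrom (t : List String) (s : Int) : List Int :=
  (PySem.List.enumerate t s).filterMap (fun q => if pM q.2 then some q.1 else none)

/-- B's slicing step: slice `lines` between consecutive bounds. -/
def chopN (lines : List String) (ss : List Int) : List (List String) :=
  let bounds := ss ++ [(lines.length : Int)]
  (bounds.zip bounds.tail).map (fun q => PySem.List.slice lines (some q.1) (some q.2))

theorem startsFrom_free (t : List String) (s : Int) (h : ∀ x ∈ t, pM x = false) :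
    startsFrom t s = [] := by
  induction t generalizing s with
  | nil => simp [startsFrom]
  | cons x xs ih =>
    have hx := h x (by simp)
    have := ih (s + 1) (fun y hy => h y (by simp [hy]))
    simpa [startsFrom, PySem.List.enumerate_cons, hx] using this

theorem startsFrom_decomp (u : List String) (m : String) (v : List String) (s : Int)
    (hu : ∀ x ∈ u, pM x = false) (hm : pM m = true) :
    startsFrom (u ++ m :: v) s = (s + u.length) :: startsFrom v (s + u.length + 1) := by
  have h1 := startsFrom_free u s hu
  simp only [startsFrom, PySem.List.enumerate_append, List.filterMap_append,
    PySem.List.enumerate_cons, List.filterMap_cons, hm] at *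
  simp [h1]

theorem blockAcc_free (t cur : List String) (h : ∀ x ∈ t, pM x = false) :
    blockAcc cur t = ([], cur ++ t) := by
  induction t generalizing cur with
  | nil => simp [blockAcc]
  | cons x xs ih =>
    have hx := h x (by simp)
    simp [blockAcc, hx, ih (cur ++ [x]) (fun y hy => h y (by simp [hy]))]

theorem blockAcc_decomp (u : List String) (m : String) (v cur : List String)
    (hu : ∀ x ∈ u, pM x = false) (hm : pM m = true) :
    blockAcc cur (u ++ m :: v) = ((cur ++ u) :: (blockAcc [m] v).1, (blockAcc [m] v).2) := by
  induction u generalizing cur with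
  | nil => simp [blockAcc, hm]
  | cons x xs ih =>
    have hx := hu x (by simp)
    simp [blockAcc, hx, ih (cur ++ [x]) (fun y hy => hu y (by simp [hy]))]

theorem chopN_cons (lines : List String) (a b : Int) (rest : List Int) :
    chopN lines (a :: b :: rest) =
      PySem.List.slice lines (some a) (some b) :: chopN lines (b :: rest) := by
  simp [chopN]

theorem decomp_or (t : List String) :
    (∀ x ∈ t, pM x = false) ∨
    ∃ u m v, t = u ++ m :: v ∧ (∀ x ∈ u, pM x = false) ∧ pM m = true := by
  induction t with
  | nil => left; simp
  | cons x xs ih =>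
    by_cases hx : pM x = true
    · right; exact ⟨[], x, xs, by simp, by simp, hx⟩
    · rcases ih with hfree | ⟨u, m, v, rfl, hu, hm⟩
      · left; intro y hy
        rcases List.mem_cons.mp hy with rfl | hy
        · simpa using hx
        · exact hfree y hy
      · right
        refine ⟨x :: u, m, v, rfl, ?_, hm⟩
        intro y hy
        rcases List.mem_cons.mp hy with rfl | hy
        · simpa using hx
        · exact hu y hy

theorem chop_free (h : List String) (m : String) (t : List String)
    (hfree : ∀ x ∈ t, pM x = false) :
    chopN (h ++ m :: t) [(h.length : Int)] = blocks [m] t := by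
  have h1 : chopN (h ++ m :: t) [(h.length : Int)] =
      [PySem.List.slice (h ++ m :: t) (some (h.length : Int))
        (some (((h ++ m :: t).length : Nat) : Int))] := by
    simp [chopN]
  rw [h1, PySem.List.slice_natCast, List.drop_left]
  have h2 : (h ++ m :: t).length - h.length = t.length + 1 := by simp
  rw [h2, List.take_of_length_le (by simp)]
  simp [blocks, blockAcc_free t [m] hfree]

theorem chop_main : ∀ (n : Nat) (t : List String), t.length ≤ n → ∀ (h : List String) (m : String),
    chopN (h ++ m :: t) ((h.length : Int) :: startsFrom t ((h.length : Int) + 1)) = blocks [m] t := by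
  intro n
  induction n with
  | zero =>
    intro t ht h m
    have ht0 : t = [] := List.eq_nil_of_length_eq_zero (Nat.le_zero.mp ht)
    subst ht0
    rw [startsFrom_free _ _ (by simp)]
    exact chop_free h m [] (by simp)
  | succ n ih =>
    intro t ht h m
    rcases decomp_or t with hfree | ⟨u, m', v, rfl, hu, hm'⟩
    · rw [startsFrom_free _ _ hfree]
      exact chop_free h m t hfree
    · rw [startsFrom_decomp u m' v _ hu hm', chopN_cons]
      have hlen : v.length ≤ n := by
        simp only [List.length_append, List.length_cons] at ht; omega
      have hc1 : (h.length : Int) + 1 + (u.length : Int) = ((h.length + 1 + u.length : Nat) : Int) := by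
        push_cast; ring
      have hlist : h ++ m :: (u ++ m' :: v) = (h ++ m :: u) ++ m' :: v := by simp
      have hsl : PySem.List.slice (h ++ m :: (u ++ m' :: v)) (some (h.length : Int))
          (some ((h.length : Int) + 1 + (u.length : Int))) = m :: u := by
        rw [hc1, PySem.List.slice_natCast, List.drop_left]
        have h3 : h.length + 1 + u.length - h.length = u.length + 1 := by omega
        rw [h3]
        have h4 : m :: (u ++ m' :: v) = (m :: u) ++ m' :: v := by simp
        rw [h4, show u.length + 1 = (m :: u).length from by simp, List.take_left]
      have hc2 : ((h ++ m :: u).length : Int) = (h.length : Int) + 1 + (u.length : Int) := by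
        push_cast [List.length_append, List.length_cons]; ring
      have hih := ih v hlen (h ++ m :: u) m'
      rw [hc2, ← hlist] at hih
      rw [hsl, hih]
      simp [blocks, blockAcc_decomp u m' v [m] hu hm']

theorem exists_decomp (lines : List String)
    (hp : lines.any (fun l => PySem.Str.startswith l "MOTIF") = true) :
    ∃ h m t, lines = h ++ m :: t ∧ (∀ x ∈ h, pM x = false) ∧ pM m = true := by
  induction lines with
  | nil => simp at hp
  | cons x xs ih =>
    by_cases hx : pM x = true
    · exact ⟨[], x, xs, by simp, by simp, hx⟩
    · have hp' : xs.any (fun l => PySem.Str.startswith l "MOTIF") = true := by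
        rcases List.any_eq_true.mp hp with ⟨y, hy, hpy⟩
        rcases List.mem_cons.mp hy with hy | hy
        · exact absurd hpy (by simpa [pM, hy] using hx)
        · exact List.any_eq_true.mpr ⟨y, hy, hpy⟩
      obtain ⟨h, m, t, rfl, hh, hm⟩ := ih hp'
      exact ⟨x :: h, m, t, rfl, by
        intro y hy; rcases List.mem_cons.mp hy with hy | hy
        · subst hy; simpa using hx
        · exact hh y hy, hm⟩

/-- A's loop body, named. -/
def fA (st : List String × List (List String) × Bool × List String) (line : String) :
    List String × List (List String) × Bool × List String :=
  let hdr := st.1; let ms := st.2.1; let inH := st.2.2.1; let cur := st.2.2.2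
  if inH then
    if PySem.Str.startswith line "MOTIF" then (hdr, ms, false, [line])
    else (hdr ++ [line], ms, inH, cur)
  else
    if PySem.Str.startswith line "MOTIF" then
      (hdr, (if cur = [] then ms else ms ++ [cur]), inH, [line])
    else (hdr, ms, inH, cur ++ [line])

theorem foldA_header (h : List String) (hdr : List String) (ms : List (List String))
    (cur : List String) (hh : ∀ x ∈ h, pM x = false) :
    List.foldl fA (hdr, ms, true, cur) h = (hdr ++ h, ms, true, cur) := by
  induction h generalizing hdr with
  | nil => simp
  | cons x xs ih =>
    have hx : PySem.Chars.startswith x.toList ['M', 'O', 'T', 'I', 'F'] = false := by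
      simpa [pM] using hh x (by simp)
    simp only [List.foldl_cons]
    rw [show fA (hdr, ms, true, cur) x = (hdr ++ [x], ms, true, cur) by simp [fA, hx]]
    rw [ih (hdr ++ [x]) (fun y hy => hh y (by simp [hy]))]
    simp

theorem foldA_motif (t : List String) (hdr : List String) (ms : List (List String))
    (cur : List String) (hcur : cur ≠ []) :
    List.foldl fA (hdr, ms, false, cur) t =
      (hdr, ms ++ (blockAcc cur t).1, false, (blockAcc cur t).2) := by
  induction t generalizing ms cur with
  | nil => simp [blockAcc]
  | cons x xs ih =>
    by_cases hx : pM x = true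
    · have hx2 : PySem.Chars.startswith x.toList ['M', 'O', 'T', 'I', 'F'] = true := by
        simpa [pM] using hx
      simp only [List.foldl_cons]
      rw [show fA (hdr, ms, false, cur) x = (hdr, ms ++ [cur], false, [x]) by
        simp [fA, hcur, hx2]]
      rw [ih (ms ++ [cur]) [x] (by simp)]
      simp [blockAcc, hx]
    · have hx2 : PySem.Chars.startswith x.toList ['M', 'O', 'T', 'I', 'F'] = false := by
        simpa [pM] using hx
      simp only [List.foldl_cons]
      rw [show fA (hdr, ms, false, cur) x = (hdr, ms, false, cur ++ [x]) by simp [fA, hx2]]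
      rw [ih ms (cur ++ [x]) (by simp)]
      simp [blockAcc, hx]

theorem blockAcc_ne_nil (t : List String) (cur : List String) (hcur : cur ≠ []) :
    (blockAcc cur t).2 ≠ [] := by
  induction t generalizing cur with
  | nil => simpa [blockAcc]
  | cons x xs ih =>
    by_cases hx : pM x = true
    · simp [blockAcc, hx]; exact ih [x] (by simp)
    · simp [blockAcc, hx]; exact ih (cur ++ [x]) (by simp)

theorem A_main (h : List String) (m : String) (t : List String)
    (hh : ∀ x ∈ h, pM x = false) (hm : pM m = true) :
    split_header_and_motifs (h ++ m :: t) = (h, blocks [m] t) := by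
  have hfold : split_header_and_motifs (h ++ m :: t) =
      (let st := List.foldl fA ([], [], true, []) (h ++ m :: t)
       (st.1, if st.2.2.2 = [] then st.2.1 else st.2.1 ++ [st.2.2.2])) := rfl
  rw [hfold, List.foldl_append, foldA_header h [] [] [] hh]
  simp only [List.foldl_cons]
  have hm2 : PySem.Chars.startswith m.toList ['M', 'O', 'T', 'I', 'F'] = true := by
    simpa [pM] using hm
  rw [show fA (([] : List String) ++ h, [], true, []) m = (h, [], false, [m]) by
    simp [fA, hm2]]
  rw [foldA_motif t h [] [m] (by simp)]
  simp [blocks, blockAcc_ne_nil t [m] (by simp)]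

theorem alt_eq (lines : List String) (s0 : Int) (rest : List Int)
    (hs : (PySem.List.enumerate lines 0).filterMap
        (fun q => if PySem.Str.startswith q.2 "MOTIF" then some q.1 else none) = s0 :: rest) :
    split_header_and_motifs_alt lines =
      (PySem.List.slice lines none (some s0), chopN lines (s0 :: rest)) := by
  simp only [split_header_and_motifs_alt, chopN, hs]

theorem B_main (h : List String) (m : String) (t : List String)
    (hh : ∀ x ∈ h, pM x = false) (hm : pM m = true) :
    split_header_and_motifs_alt (h ++ m :: t) = (h, blocks [m] t) := by
  have hstarts : (PySem.List.enumerate (h ++ m :: t) 0).filterMap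
      (fun q => if PySem.Str.startswith q.2 "MOTIF" then some q.1 else none)
      = (h.length : Int) :: startsFrom t ((h.length : Int) + 1) := by
    have hd := startsFrom_decomp h m t 0 hh hm
    simp only [startsFrom, pM, zero_add] at hd ⊢
    exact hd
  rw [alt_eq _ _ _ hstarts]
  rw [PySem.List.slice_to_natCast, List.take_left]
  rw [chop_main t.length t le_rfl h m]

-- ===== VERDICT (by name: the statement is the Claim_ definition above) =====
theorem split_header_and_motifs_spec : Claim_equal_split_header_and_motifs := by
  intro lines _ hpre
  obtain ⟨h, m, t, rfl, hh, hm⟩ := exists_decomp lines hpre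
  unfold Spec_split_header_and_motifs
  rw [A_main h m t hh hm, B_main h m t hh hm]
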